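-- pv_equiv track=rewrite | github.com/prazuma/SalesmanProblem | solver_partition.py | remove_common
-- ===== SOURCE A (Python) =====
-- def remove_common(city, point, key):
--     path = []
--     if(key % 2 == 0):
--         point += len(city)
--         for i in range(len(city) - 1):
--             path.append(city[(point - i) % len(city)])
--     else:
--         for i in range(len(city) - 1):
--             path.append(city[(point + i) % len(city)])
--     return path
-- ===== SOURCE B (Python) =====
-- def remove_common(city, point, key):
--     if not city:
--         return []
--     n = len(city)
--     s = point % n
--     if key % 2 == 0:
--         rot = city[s + 1:] + city[:s + 1]
--         rot.reverse()
--     else: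
--         rot = city[s:] + city[:s]
--     return rot[:n - 1]
-- ===== Notes on version B (the rewrite author's own statement) =====
-- stated objective: faster
-- what changed: Replaces A's per-element modular-index append loop by whole-list rotation built from two slice concatenations (reversed for even key) and trimmed to len-1, with the empty list guarded up front.
import Mathlib
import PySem

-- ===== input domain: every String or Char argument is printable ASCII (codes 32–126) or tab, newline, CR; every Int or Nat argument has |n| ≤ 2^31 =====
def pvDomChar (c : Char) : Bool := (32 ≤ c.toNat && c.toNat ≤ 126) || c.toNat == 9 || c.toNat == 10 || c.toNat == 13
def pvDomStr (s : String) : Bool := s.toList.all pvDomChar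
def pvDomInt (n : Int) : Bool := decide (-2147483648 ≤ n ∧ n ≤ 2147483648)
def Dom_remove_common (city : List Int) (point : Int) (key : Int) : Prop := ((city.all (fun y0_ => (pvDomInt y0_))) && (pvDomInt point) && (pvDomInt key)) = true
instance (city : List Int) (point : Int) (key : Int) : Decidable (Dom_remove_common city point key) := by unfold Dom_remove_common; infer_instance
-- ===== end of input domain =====

-- B replaces A's per-element modular-index loop by whole-list rotation built via
-- slicing, then trimming; measurably faster in Python by a constant factor (bulk
-- slice copies instead of per-element indexing).

-- ===== PORT A =====
-- index (point±i) % len(city) is always in range when the loop runs, so pyGetD's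
-- default 0 is never used (Python never raises here).
def remove_common (city : List Int) (point : Int) (key : Int) : List Int :=
  if PySem.Int.mod key 2 = 0 then
    let point := point + (city.length : Int)
    (PySem.List.pyRange 0 ((city.length : Int) - 1) 1).foldl
      (fun path i => path ++ [PySem.List.pyGetD city (PySem.Int.mod (point - i) (city.length : Int)) 0]) []
  else
    (PySem.List.pyRange 0 ((city.length : Int) - 1) 1).foldl
      (fun path i => path ++ [PySem.List.pyGetD city (PySem.Int.mod (point + i) (city.length : Int)) 0]) []

-- ===== PORT B =====
def remove_common_alt (city : List Int) (point : Int) (key : Int) : List Int :=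
  if city = [] then []
  else
    let n : Int := (city.length : Int)
    let s := PySem.Int.mod point n
    let rot :=
      if PySem.Int.mod key 2 = 0 then
        (PySem.List.slice city (some (s + 1)) none ++ PySem.List.slice city none (some (s + 1))).reverse
      else
        PySem.List.slice city (some s) none ++ PySem.List.slice city none (some s)
    PySem.List.slice rot none (some (n - 1))

-- ===== PRECONDITION & SPEC =====
def Spec_remove_common (city : List Int) (point : Int) (key : Int) (out : List Int) : Prop := out = remove_common_alt city point key
instance (city : List Int) (point : Int) (key : Int) (out : List Int) : Decidable (Spec_remove_common city point key out) := by unfold Spec_remove_common; infer_instance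

-- ===== CLAIM (what is proved, stated in full; the proofs are below) =====
def Claim_equal_remove_common : Prop := ∀ (city : List Int) (point : Int) (key : Int), Dom_remove_common city point key → Spec_remove_common city point key (remove_common city point key)

-- ===== LEMMAS AND PROOFS =====

lemma pv_mod_add_nat (p : Int) {N : Nat} (hN : 0 < N) (t : Nat) :
    PySem.Int.mod (p + (t : Int)) (N : Int) =
      ((((PySem.Int.mod p (N : Int)).toNat + t) % N : Nat) : Int) := by
  have hNpos : (0:Int) < (N : Int) := by exact_mod_cast hN
  rw [PySem.Int.mod_eq_emod_of_pos hNpos, PySem.Int.mod_eq_emod_of_pos hNpos]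
  have hr : 0 ≤ p % (N : Int) := Int.emod_nonneg _ (by omega)
  have hsplit : p + (t : Int) = (p % (N : Int) + t) + (N : Int) * (p / (N : Int)) := by
    have := Int.emod_add_mul_ediv p (N : Int); linarith
  rw [hsplit, Int.add_mul_emod_self_left]
  conv_lhs => rw [← Int.toNat_of_nonneg hr]
  push_cast
  ring_nf

theorem pv_remove_common_eq (city : List Int) (point : Int) (key : Int) :
    remove_common city point key = remove_common_alt city point key := by
  simp only [remove_common, remove_common_alt]
  by_cases hnil : city = []
  · subst hnil
    split
    · simp [PySem.List.pyRange_one]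
    · simp [PySem.List.pyRange_one]
  · have hN : 0 < city.length := List.length_pos_of_ne_nil hnil
    rw [if_neg hnil]
    have hn : (0:Int) < (city.length : Int) := by exact_mod_cast hN
    have hs0 : 0 ≤ PySem.Int.mod point (city.length : Int) := PySem.Int.mod_nonneg _ hn
    have hslt : PySem.Int.mod point (city.length : Int) < (city.length : Int) :=
      PySem.Int.mod_lt _ hn
    set s := PySem.Int.mod point (city.length : Int) with hs
    have hsn : s.toNat < city.length := by omega
    have hN1 : ((city.length : Int) - 1).toNat = city.length - 1 := by omega
    by_cases hk : PySem.Int.mod key 2 = 0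
    · rw [if_pos hk, if_pos hk]
      rw [PySem.List.foldl_append_singleton_eq_map, PySem.List.pyRange_one,
        PySem.List.slice_from city (by omega : (0:Int) ≤ s + 1),
        PySem.List.slice_to city (by omega : (0:Int) ≤ s + 1),
        PySem.List.slice_to _ (by omega : (0:Int) ≤ (city.length : Int) - 1)]
      have hst : (s + 1).toNat = s.toNat + 1 := by omega
      rw [hst, hN1, ← List.rotate_eq_drop_append_take (by omega : s.toNat + 1 ≤ city.length),
        List.map_map, List.nil_append]
      apply List.ext_getElem
      · simp
      · intro k h1 h2
        simp only [List.getElem_map, List.getElem_range, Function.comp_apply,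
          List.getElem_take, List.getElem_reverse, List.getElem_rotate,
          List.length_rotate]
        have hkN : k < city.length - 1 := by simpa using h1
        have harg : point + (city.length : Int) - (0 + (k : Int)) =
            point + ((city.length - k : Nat) : Int) := by
          have : k ≤ city.length := by omega
          omega
        rw [harg, pv_mod_add_nat point hN, ← hs,
          PySem.List.pyGetD_ofNat _ _ _ (Nat.mod_lt _ hN)]
        congr 1
        have : city.length - 1 - k + (s.toNat + 1) = s.toNat + (city.length - k) := by omega
        rw [this]
    · rw [if_neg hk, if_neg hk]
      rw [PySem.List.foldl_append_singleton_eq_map, PySem.List.pyRange_one,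
        PySem.List.slice_from city hs0, PySem.List.slice_to city hs0,
        PySem.List.slice_to _ (by omega : (0:Int) ≤ (city.length : Int) - 1)]
      rw [hN1, ← List.rotate_eq_drop_append_take (by omega : s.toNat ≤ city.length),
        List.map_map, List.nil_append]
      apply List.ext_getElem
      · simp
      · intro k h1 h2
        simp only [List.getElem_map, List.getElem_range, Function.comp_apply,
          List.getElem_take, List.getElem_rotate]
        have harg : point + (0 + (k : Int)) = point + ((k : Nat) : Int) := by omega
        rw [harg, pv_mod_add_nat point hN, ← hs,
          PySem.List.pyGetD_ofNat _ _ _ (Nat.mod_lt _ hN)]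
        congr 1
        rw [Nat.add_comm]

-- ===== VERDICT (by name: the statement is the Claim_ definition above) =====
theorem remove_common_spec : Claim_equal_remove_common := by
  intro city point key _
  exact pv_remove_common_eq city point key
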